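-- pv_equiv track=rewrite | github.com/LukeH025/CodeSignal | 41_digitDegree.py | solution
-- ===== SOURCE A (Python) =====
-- def solution(n):
--     e=0
--     while True:
--         if (n/10)>=1:
--             r=[int(x) for x in str(n)]
--             n=sum(r)
--             e+=1
--             if n/10<1:
--                 break
--         else:
--             break
--     return e
-- ===== SOURCE B (Python) =====
-- def solution(n):
--     # Same digit-degree computation, written as a recursion that threads the
--     # step count through `1 +` instead of A's while-True loop with a counter.
--     if n < 10:
--         return 0
--     return 1 + solution(sum(int(x) for x in str(n)))
-- ===== Notes on version B (the rewrite author's own statement) =====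
-- stated objective: simpler
-- what changed: Replaces A's while-True loop with an explicit counter, float-division guards and a mid-loop break by a three-line base-case recursion that adds 1 per digit-sum step.
import Mathlib
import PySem

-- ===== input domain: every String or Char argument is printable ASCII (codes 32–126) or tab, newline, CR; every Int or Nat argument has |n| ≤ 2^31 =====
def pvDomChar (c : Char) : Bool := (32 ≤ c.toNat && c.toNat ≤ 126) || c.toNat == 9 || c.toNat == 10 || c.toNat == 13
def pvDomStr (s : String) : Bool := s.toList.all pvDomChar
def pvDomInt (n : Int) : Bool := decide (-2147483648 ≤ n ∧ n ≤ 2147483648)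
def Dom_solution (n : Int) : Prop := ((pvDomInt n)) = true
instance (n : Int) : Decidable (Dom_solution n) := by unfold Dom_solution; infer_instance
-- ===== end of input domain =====

-- B rewrites A's while-True loop with an explicit counter as a base-case recursion adding 1 per
-- digit-sum step; same values everywhere (objective: simpler).

-- int(x) for a single character x (both sources contain this subexpression; only reached on digit chars)
def pvCharInt (c : Char) : Int := (PySem.Int.ofChars? [c]).getD 0

-- decimal digit sum of a Nat, used only to phrase the termination lemmas below
def pvSd (n : Nat) : Nat :=
  if n < 10 then n else n % 10 + pvSd (n / 10)
termination_by n
decreasing_by omega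

theorem pvSd_le (n : Nat) : pvSd n ≤ n := by
  induction n using Nat.strong_induction_on with
  | _ n ih =>
    rw [pvSd]
    split
    · omega
    · have := ih (n / 10) (by omega)
      omega

theorem pvSd_lt (n : Nat) (h : 10 ≤ n) : pvSd n < n := by
  rw [pvSd]
  have := pvSd_le (n / 10)
  split <;> omega

theorem pvCharInt_digitChar (d : Nat) (h : d < 10) :
    pvCharInt (Nat.digitChar d) = (d : Int) := by
  interval_cases d <;> decide

theorem pvTdc_sum : ∀ (fuel n : Nat) (ds : List Char), n < fuel →
    ((Nat.toDigitsCore 10 fuel n ds).map pvCharInt).sum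
      = (pvSd n : Int) + (ds.map pvCharInt).sum := by
  intro fuel
  induction fuel with
  | zero => intro n ds h; omega
  | succ fuel ih =>
    intro n ds h
    rw [Nat.toDigitsCore]
    by_cases h10 : n / 10 = 0
    · have hn : n < 10 := by omega
      rw [if_pos h10, pvSd, if_pos hn]
      simp only [List.map_cons, List.sum_cons, pvCharInt_digitChar (n % 10) (by omega)]
      have : n % 10 = n := by omega
      rw [this]
    · have hn : ¬ n < 10 := by omega
      rw [if_neg h10, ih (n / 10) _ (by omega)]
      conv_rhs => rw [pvSd, if_neg hn]
      simp only [List.map_cons, List.sum_cons, pvCharInt_digitChar (n % 10) (by omega)]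
      push_cast
      ring

theorem pvDigitSum_eq (n : Int) (h : 0 ≤ n) :
    ((PySem.Int.toChars n).map pvCharInt).sum = (pvSd n.toNat : Int) := by
  rw [PySem.Int.toChars, if_neg (by omega), Nat.toDigits,
    pvTdc_sum (n.toNat + 1) n.toNat [] (by omega)]
  simp

theorem pvDigitSum_toNat_lt (n : Int) (h : 10 ≤ n) :
    (((PySem.Int.toChars n).map pvCharInt).sum).toNat < n.toNat := by
  rw [pvDigitSum_eq n (by omega)]
  have := pvSd_lt n.toNat (by omega)
  omega

-- ===== PORT A =====
-- while True: if n/10 >= 1 (i.e. 10 <= n for ints in range): r = digits of str(n); n = sum r;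
-- e += 1; break when n/10 < 1; else break. The float guards n/10>=1 / n/10<1 are exact as
-- 10 <= n / n < 10 for |n| <= 2^31. The fuel parameter only makes the loop structural; the
-- loop value strictly decreases, so fuel n.toNat + 1 is never exhausted (proved in
-- solutionLoop_eq below).
def solutionLoop : Nat → Int → Int → Int
  | 0, _, e => e
  | fuel + 1, n, e =>
    if 10 ≤ n then
      let r : List Int := (PySem.Int.toChars n).map pvCharInt   -- r = [int(x) for x in str(n)]
      let n' := r.sum                                            -- n = sum(r)
      if n' < 10 then e + 1                                      -- e += 1; if n/10 < 1: break
      else solutionLoop fuel n' (e + 1)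
    else e

def solution (n : Int) : Int := solutionLoop (n.toNat + 1) n 0

-- ===== PORT B =====
def solution_alt (n : Int) : Int :=
  if _h : n < 10 then 0
  else 1 + solution_alt (((PySem.Int.toChars n).map pvCharInt).sum)  -- sum(int(x) for x in str(n))
termination_by n.toNat
decreasing_by exact pvDigitSum_toNat_lt n (by omega)

-- ===== PRECONDITION & SPEC =====
def Spec_solution (n : Int) (out : Int) : Prop := out = solution_alt n
instance (n : Int) (out : Int) : Decidable (Spec_solution n out) := by unfold Spec_solution; infer_instance

-- ===== CLAIM (what is proved, stated in full; the proofs are below) =====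
def Claim_equal_solution : Prop := ∀ (n : Int), Dom_solution n → Spec_solution n (solution n)

-- ===== LEMMAS AND PROOFS =====
theorem solutionLoop_eq : ∀ (fuel : Nat) (n e : Int), n.toNat < fuel →
    solutionLoop fuel n e = e + solution_alt n := by
  intro fuel
  induction fuel with
  | zero => intro n e h; omega
  | succ fuel ih =>
    intro n e h
    simp only [solutionLoop]
    by_cases h10 : 10 ≤ n
    · rw [if_pos h10]
      by_cases hlt : ((PySem.Int.toChars n).map pvCharInt).sum < 10
      · rw [if_pos hlt]
        conv_rhs => rw [solution_alt, dif_neg (show ¬ n < 10 by omega)]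
        conv_rhs => rw [solution_alt, dif_pos hlt]
        ring
      · have hdec := pvDigitSum_toNat_lt n h10
        rw [if_neg hlt, ih _ _ (by omega)]
        conv_rhs => rw [solution_alt, dif_neg (show ¬ n < 10 by omega)]
        ring
    · rw [if_neg h10]
      conv_rhs => rw [solution_alt, dif_pos (by omega)]
      ring

-- ===== VERDICT (by name: the statement is the Claim_ definition above) =====
theorem solution_spec : Claim_equal_solution := by
  intro n _
  show solution n = solution_alt n
  rw [solution, solutionLoop_eq (n.toNat + 1) n 0 (by omega)]
  ring
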